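-- pv_equiv track=rewrite | github.com/VladMalosev/Blink-Analysis-FRT | code/functions/microsaccade_detection.py | _find_continuous_events
-- ===== SOURCE A (Python) =====
-- def _find_continuous_events(indices):
--     if len(indices) == 0:
--         return []
--
--     events = []
--     current_event = [indices[0]]
--
--     # handles small detection dropouts
--     for i in range(1, len(indices)):
--         if indices[i] <= indices[i - 1] + 2:
--             current_event.append(indices[i])
--         else:
--             if len(current_event) >= 2:
--                 events.append(current_event)
--             current_event = [indices[i]]
--
--     if len(current_event) >= 2:
--         events.append(current_event)
--
--     return events
-- ===== SOURCE B (Python) =====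
-- def _find_continuous_events(indices):
--     n = len(indices)
--     cuts = [0] + [i for i in range(1, n) if indices[i] > indices[i - 1] + 2] + [n]
--     segments = [indices[lo:hi] for lo, hi in zip(cuts, cuts[1:])]
--     return [seg for seg in segments if len(seg) >= 2]
-- ===== Notes on version B (the rewrite author's own statement) =====
-- stated objective: alternative
-- what changed: Instead of one stateful loop emitting events as it goes, B first collects the boundary positions where the gap exceeds 2, slices the list at those cuts into segments, and filters the segments of length >= 2.
import Mathlib
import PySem

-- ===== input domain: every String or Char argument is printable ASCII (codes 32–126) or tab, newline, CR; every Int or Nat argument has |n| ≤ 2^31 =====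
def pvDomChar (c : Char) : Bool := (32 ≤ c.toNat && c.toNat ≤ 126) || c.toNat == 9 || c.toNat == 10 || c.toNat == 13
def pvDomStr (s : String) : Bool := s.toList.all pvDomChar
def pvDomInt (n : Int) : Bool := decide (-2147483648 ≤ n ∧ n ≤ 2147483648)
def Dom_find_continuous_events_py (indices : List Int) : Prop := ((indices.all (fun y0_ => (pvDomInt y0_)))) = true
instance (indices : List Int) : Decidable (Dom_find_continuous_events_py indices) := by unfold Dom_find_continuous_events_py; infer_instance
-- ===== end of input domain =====

-- B groups near-consecutive indices by computing boundary cut positions and slicing at them,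
-- instead of A's stateful accumulator loop; same O(n) cost (objective: alternative decomposition).

-- ===== PORT A =====
-- A's for-loop over range(1, len) as structural recursion over the tail; `prev` is indices[i-1]
-- (always the element A appended last), `cur` is current_event, `events` the accumulator.
def aLoop (events : List (List Int)) (cur : List Int) (prev : Int) : List Int → List (List Int)
  | [] => if 2 ≤ cur.length then events ++ [cur] else events
  | y :: rest =>
    if y ≤ prev + 2 then aLoop events (cur ++ [y]) y rest
    else aLoop (if 2 ≤ cur.length then events ++ [cur] else events) [y] y rest

def find_continuous_events_py (indices : List Int) : List (List Int) :=
  match indices with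
  | [] => []
  | x :: xs => aLoop [] [x] x xs

-- ===== PORT B =====
-- the filter predicate of B's boundary comprehension; i is always in [1, len), so pyGetD with
-- default 0 is exact for Python's indices[i] / indices[i-1]
def bPred (l : List Int) (i : Int) : Bool := decide (PySem.List.pyGetD l (i-1) 0 + 2 < PySem.List.pyGetD l i 0)

-- [i for i in range(a, n) if indices[i] > indices[i - 1] + 2]
def bBnd (l : List Int) (a : Int) : List Int := (PySem.List.pyRange a l.length 1).filter (bPred l)

def find_continuous_events_py_alt (indices : List Int) : List (List Int) :=
  let cuts : List Int := 0 :: (bBnd indices 1 ++ [(indices.length : Int)])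
  let segments := (cuts.zip cuts.tail).map
    (fun p => PySem.List.slice indices (some p.1) (some p.2))
  segments.filter (fun seg => decide (2 ≤ seg.length))

-- ===== PRECONDITION & SPEC =====
def Spec_find_continuous_events_py (indices : List Int) (out : List (List Int)) : Prop := out = find_continuous_events_py_alt indices
instance (indices : List Int) (out : List (List Int)) : Decidable (Spec_find_continuous_events_py indices out) := by unfold Spec_find_continuous_events_py; infer_instance

-- ===== CLAIM (what is proved, stated in full; the proofs are below) =====
def Claim_equal_find_continuous_events_py : Prop := ∀ (indices : List Int), Dom_find_continuous_events_py indices → Spec_find_continuous_events_py indices (find_continuous_events_py indices)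

-- ===== LEMMAS AND PROOFS =====

-- canonical recursive chunker: `chunk prev l` = (continuation of the current run, later runs)
def chunk (prev : Int) : List Int → List Int × List (List Int)
  | [] => ([], [])
  | y :: ys =>
    let p := chunk y ys
    if y ≤ prev + 2 then (y :: p.1, p.2) else ([], (y :: p.1) :: p.2)

-- index-based twin of `chunk`, starting at position a of l
def Hfun (l : List Int) (a : Int) : List Int × List (List Int) :=
  if h : a < l.length then
    let p := Hfun l (a + 1)
    if bPred l a then ([], (PySem.List.pyGetD l a 0 :: p.1) :: p.2)
    else (PySem.List.pyGetD l a 0 :: p.1, p.2)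
  else ([], [])
termination_by (l.length - a).toNat
decreasing_by omega

-- A's loop computes the length-≥-2 filter of the chunk decomposition
theorem aLoop_eq_chunk (rest : List Int) : ∀ (events : List (List Int)) (cur : List Int) (prev : Int),
    aLoop events cur prev rest =
      events ++ (((cur ++ (chunk prev rest).1) :: (chunk prev rest).2).filter (fun s => decide (2 ≤ s.length))) := by
  induction rest with
  | nil =>
    intro events cur prev
    by_cases hc : 2 ≤ cur.length <;> simp [aLoop, chunk, List.filter, hc]
  | cons y ys ih =>
    intro events cur prev
    by_cases h : y ≤ prev + 2
    · rw [show aLoop events cur prev (y :: ys) = aLoop events (cur ++ [y]) y ys from by simp [aLoop, h]]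
      rw [ih]
      simp [chunk, h]
    · rw [show aLoop events cur prev (y :: ys)
          = aLoop (if 2 ≤ cur.length then events ++ [cur] else events) [y] y ys from by simp [aLoop, h]]
      rw [ih]
      simp only [chunk, if_neg h, List.singleton_append, List.filter]
      by_cases hc : 2 ≤ cur.length
      · simp [hc]
      · simp [hc]

theorem chunk_eq_Hfun (l : List Int) : ∀ (k : Nat) (a : Int), 1 ≤ a → (l.length - a).toNat ≤ k →
    chunk (PySem.List.pyGetD l (a - 1) 0) (l.drop a.toNat) = Hfun l a := by
  intro k
  induction k with
  | zero =>
    intro a h1 hk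
    rw [List.drop_eq_nil_of_le (by omega), Hfun, dif_neg (by omega)]
    rfl
  | succ k ih =>
    intro a h1 hk
    by_cases h : a < (l.length : Int)
    · have ha : a.toNat < l.length := by omega
      have hdrop : l.drop a.toNat = l[a.toNat] :: l.drop (a.toNat + 1) := List.drop_eq_getElem_cons ha
      have hget : PySem.List.pyGetD l a 0 = l[a.toNat] := PySem.List.pyGetD_eq_getElem l 0 (by omega) h
      have hdrop1 : l.drop (a + 1).toNat = l.drop (a.toNat + 1) := by congr 1; omega
      have hih := ih (a + 1) (by omega) (by omega)
      rw [show a + 1 - 1 = a from by omega] at hih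
      rw [hdrop, Hfun, dif_pos h]
      simp only [chunk]
      rw [← hget, ← hdrop1, hih]
      by_cases hb : bPred l a = true
      · have : ¬ (PySem.List.pyGetD l a 0 ≤ PySem.List.pyGetD l (a - 1) 0 + 2) := by
          simpa [bPred] using hb
        simp [this, hb]
      · have : PySem.List.pyGetD l a 0 ≤ PySem.List.pyGetD l (a - 1) 0 + 2 := by
          simpa [bPred] using hb
        simp [this, hb]
    · rw [List.drop_eq_nil_of_le (by omega), Hfun, dif_neg h]
      rfl

theorem bBnd_nil (l : List Int) (a : Int) (h : (l.length : Int) ≤ a) : bBnd l a = [] := by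
  unfold bBnd
  rw [PySem.List.pyRange_one_eq_nil h]
  rfl

theorem bBnd_cons_step (l : List Int) (a : Int) (h : a < (l.length : Int)) :
    bBnd l a = (if bPred l a then [a] else []) ++ bBnd l (a + 1) := by
  unfold bBnd
  rw [PySem.List.pyRange_one_cons h, List.filter_cons]
  split <;> simp_all

-- if bBnd l a = b :: bs then b is the first boundary at or after a
theorem bBnd_cons_elim (l : List Int) : ∀ (k : Nat) (a b : Int) (bs : List Int), (l.length - a).toNat ≤ k →
    bBnd l a = b :: bs →
    a ≤ b ∧ b < (l.length : Int) ∧ bPred l b = true ∧ bs = bBnd l (b + 1) ∧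
      (∀ i, a ≤ i → i < b → ¬ bPred l i = true) := by
  intro k
  induction k with
  | zero =>
    intro a b bs hk heq
    rw [bBnd_nil l a (by omega)] at heq
    exact absurd heq (by simp)
  | succ k ih =>
    intro a b bs hk heq
    by_cases h : a < (l.length : Int)
    · rw [bBnd_cons_step l a h] at heq
      by_cases hp : bPred l a = true
      · rw [if_pos hp] at heq
        simp only [List.singleton_append, List.cons.injEq] at heq
        obtain ⟨rfl, rfl⟩ := heq
        exact ⟨le_refl _, h, hp, rfl, fun i h1 h2 => absurd (lt_of_le_of_lt h1 h2) (lt_irrefl _)⟩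
      · rw [if_neg hp, List.nil_append] at heq
        obtain ⟨h1, h2, h3, h4, h5⟩ := ih (a + 1) b bs (by omega) heq
        refine ⟨by omega, h2, h3, h4, fun i hi1 hi2 => ?_⟩
        by_cases hia : i = a
        · subst hia; exact hp
        · exact h5 i (by omega) hi2
    · rw [bBnd_nil l a (by omega)] at heq
      exact absurd heq (by simp)

theorem Hfun_nil (l : List Int) : ∀ (k : Nat) (a : Int), 0 ≤ a → (l.length - a).toNat ≤ k →
    bBnd l a = [] → Hfun l a = (l.drop a.toNat, []) := by
  intro k
  induction k with
  | zero =>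
    intro a h0 hk hb
    rw [Hfun, dif_neg (by omega), List.drop_eq_nil_of_le (by omega)]
  | succ k ih =>
    intro a h0 hk hb
    by_cases h : a < (l.length : Int)
    · rw [bBnd_cons_step l a h] at hb
      by_cases hp : bPred l a = true
      · rw [if_pos hp] at hb; exact absurd hb (by simp)
      · rw [if_neg hp, List.nil_append] at hb
        have hih := ih (a + 1) (by omega) (by omega) hb
        rw [Hfun, dif_pos h, hih]
        have ha : a.toNat < l.length := by omega
        have hget : PySem.List.pyGetD l a 0 = l[a.toNat] := PySem.List.pyGetD_eq_getElem l 0 h0 h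
        have hdrop1 : l.drop (a + 1).toNat = l.drop (a.toNat + 1) := by congr 1; omega
        simp only [hp, if_false, Bool.false_eq_true]
        rw [hget, hdrop1, ← List.drop_eq_getElem_cons ha]
    · rw [Hfun, dif_neg h, List.drop_eq_nil_of_le (by omega)]

theorem Hfun_first (l : List Int) : ∀ (k : Nat) (a b : Int), 0 ≤ a → a ≤ b → b < (l.length : Int) →
    bPred l b = true → (∀ i, a ≤ i → i < b → ¬ bPred l i = true) →
    (b - a).toNat ≤ k →
    Hfun l a = ((l.drop a.toNat).take (b - a).toNat,
                (PySem.List.pyGetD l b 0 :: (Hfun l (b + 1)).1) :: (Hfun l (b + 1)).2) := by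
  intro k
  induction k with
  | zero =>
    intro a b h0 hab hb hp hno hk
    have : a = b := by omega
    subst this
    rw [Hfun, dif_pos hb, if_pos hp]
    simp
  | succ k ih =>
    intro a b h0 hab hb hp hno hk
    by_cases hab' : a = b
    · subst hab'
      rw [Hfun, dif_pos hb, if_pos hp]
      simp
    · have halt : a < b := by omega
      have ha : a < (l.length : Int) := by omega
      have hpa : ¬ bPred l a = true := hno a (le_refl _) halt
      have hih := ih (a + 1) b (by omega) (by omega) hb hp
        (fun i hi1 hi2 => hno i (by omega) hi2) (by omega)
      rw [Hfun, dif_pos ha, hih]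
      have hat : a.toNat < l.length := by omega
      have hget : PySem.List.pyGetD l a 0 = l[a.toNat] := PySem.List.pyGetD_eq_getElem l 0 h0 ha
      have hdrop1 : l.drop (a + 1).toNat = l.drop (a.toNat + 1) := by congr 1; omega
      simp only [hpa, if_false, Bool.false_eq_true]
      rw [hget, hdrop1, List.drop_eq_getElem_cons hat,
        show (b - a).toNat = (b - (a + 1)).toNat + 1 from by omega, List.take_succ_cons]

-- the cut-and-slice segmentation starting at cut position c
def segsMap (l : List Int) (c : Int) : List (List Int) :=
  ((c :: (bBnd l (c + 1) ++ [(l.length : Int)])).zip (bBnd l (c + 1) ++ [(l.length : Int)])).map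
    (fun p => PySem.List.slice l (some p.1) (some p.2))

theorem segs_eq (l : List Int) : ∀ (k : Nat) (c : Int), 0 ≤ c → c < (l.length : Int) → (l.length - c).toNat ≤ k →
    segsMap l c = (PySem.List.pyGetD l c 0 :: (Hfun l (c + 1)).1) :: (Hfun l (c + 1)).2 := by
  intro k
  induction k with
  | zero => intro c h0 hc hk; omega
  | succ k ih =>
    intro c h0 hc hk
    have hct : c.toNat < l.length := by omega
    have hgetc : PySem.List.pyGetD l c 0 = l[c.toNat] := PySem.List.pyGetD_eq_getElem l 0 h0 hc
    have hdropc : l.drop (c + 1).toNat = l.drop (c.toNat + 1) := by congr 1; omega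
    cases hbb : bBnd l (c + 1) with
    | nil =>
      have hH := Hfun_nil l (l.length - (c+1)).toNat (c + 1) (by omega) (le_refl _) hbb
      unfold segsMap
      rw [hbb, hH]
      simp only [List.nil_append, List.zip_cons_cons, List.zip_nil_right, List.map_cons, List.map_nil]
      rw [PySem.List.slice_toNat l h0 (by omega)]
      rw [List.take_of_length_le (by simp)]
      rw [List.drop_eq_getElem_cons hct, hgetc, hdropc]
    | cons b bs =>
      obtain ⟨h1, h2, h3, h4, h5⟩ := bBnd_cons_elim l (l.length - (c+1)).toNat (c + 1) b bs (le_refl _) hbb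
      have hH := Hfun_first l (b - (c+1)).toNat (c + 1) b (by omega) h1 h2 h3 h5 (le_refl _)
      have hseg : segsMap l c = PySem.List.slice l (some c) (some b) :: segsMap l b := by
        unfold segsMap
        rw [hbb, h4]
        simp
      rw [hseg, ih b (by omega) h2 (by omega), hH]
      rw [PySem.List.slice_toNat l h0 (by omega)]
      rw [List.drop_eq_getElem_cons hct,
        show (b.toNat - c.toNat) = (b - (c+1)).toNat + 1 from by omega, List.take_succ_cons,
        hgetc, hdropc]

-- ===== VERDICT (by name: the statement is the Claim_ definition above) =====
theorem find_continuous_events_py_spec : Claim_equal_find_continuous_events_py := by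
  intro indices _
  unfold Spec_find_continuous_events_py
  cases indices with
  | nil => decide
  | cons x xs =>
    have hlen : 0 < (x :: xs).length := by simp
    have hB : find_continuous_events_py_alt (x :: xs)
        = (segsMap (x :: xs) 0).filter (fun s => decide (2 ≤ s.length)) := by
      simp only [find_continuous_events_py_alt, segsMap, List.tail_cons, zero_add]
    have hchunk : chunk x xs = Hfun (x :: xs) 1 := by
      have := chunk_eq_Hfun (x :: xs) ((x :: xs).length - 1) 1 (le_refl _) (by omega)
      simpa [PySem.List.pyGetD_zero_cons] using this
    have hsegs := segs_eq (x :: xs) ((x :: xs).length : Nat) 0 (le_refl _) (by exact_mod_cast hlen) (by omega)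
    rw [show find_continuous_events_py (x :: xs) = aLoop [] [x] x xs from rfl,
      aLoop_eq_chunk, hchunk, hB, hsegs]
    simp [PySem.List.pyGetD_zero_cons]
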